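-- pv_equiv track=rewrite | github.com/Tomaskobel/slovak-accounting-project | scraper/parser.py | _extract_number_from_id
-- ===== SOURCE A (Python) =====
-- def _extract_number_from_id(element_id: str, prefix: str) -> str:
--     """Extract the section number from an element id.
--
--     Example: "paragraf-2.odsek-1.pismeno-a" with prefix "pismeno-" → "a"
--     """
--     if not element_id:
--         return ""
--     parts = element_id.split(".")
--     for part in reversed(parts):
--         if part.startswith(prefix):
--             return part[len(prefix):]
--     return element_id
-- ===== SOURCE B (Python) =====
-- def _extract_number_from_id(element_id: str, prefix: str) -> str:
--     """Single forward character pass: track the start of the current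
--     '.'-segment and remember the suffix of the LAST segment that starts
--     with prefix; no parts list, no reverse scan."""
--     if not element_id:
--         return ""
--     k = len(prefix)
--     best = None
--     seg_start = 0
--     for pos, ch in enumerate(element_id + "."):
--         if ch == ".":
--             if seg_start + k <= pos and element_id[seg_start:seg_start + k] == prefix:
--                 best = element_id[seg_start + k:pos]
--             seg_start = pos + 1
--     return element_id if best is None else best
-- ===== Notes on version B (the rewrite author's own statement) =====
-- stated objective: alternative
-- what changed: B makes a single left-to-right character pass over element_id+'.' tracking the current segment start and keeping the suffix of the LAST matching segment, instead of building a split('.') list and scanning it right-to-left for the first match.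
import Mathlib
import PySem

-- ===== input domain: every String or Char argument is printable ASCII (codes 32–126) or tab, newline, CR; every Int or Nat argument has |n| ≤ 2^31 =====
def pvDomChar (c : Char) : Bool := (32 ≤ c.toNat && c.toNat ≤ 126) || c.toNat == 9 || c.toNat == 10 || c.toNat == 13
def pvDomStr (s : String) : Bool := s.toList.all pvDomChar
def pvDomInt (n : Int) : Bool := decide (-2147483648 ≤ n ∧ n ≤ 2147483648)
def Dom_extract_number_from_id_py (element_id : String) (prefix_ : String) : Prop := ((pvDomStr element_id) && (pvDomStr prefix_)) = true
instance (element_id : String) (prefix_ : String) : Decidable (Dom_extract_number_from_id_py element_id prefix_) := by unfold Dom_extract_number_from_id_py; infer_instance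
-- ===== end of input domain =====

-- B replaces the split('.')-list + reversed scan by a single forward character pass that
-- tracks the current segment start and keeps the LAST matching segment's suffix
-- (objective: alternative; same return value, no side effects).


-- ===== PORT A =====
-- "for part in reversed(parts): if part.startswith(prefix): return part[len(prefix):]" as a
-- recursion over the reversed parts list; none = the loop fell through.
def pvGoA : List (List Char) → List Char → Option (List Char)
  | [], _ => none
  | part :: rest, p =>
    if PySem.Chars.startswith part p then
      some (PySem.Chars.slice part (some (PySem.Chars.len p)) none)
    else pvGoA rest p

def extract_number_from_id_py (element_id : String) (prefix_ : String) : String :=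
  if element_id = "" then ""
  else
    match pvGoA ((PySem.Chars.splitOn element_id.toList ['.']).reverse) prefix_.toList with
    | some r => String.ofList r
    | none => element_id

-- ===== PORT B =====
-- the "for pos, ch in enumerate(element_id + '.')" loop of Source B: state (pos, seg_start, best)
def pvLoopB (full p : List Char) : List Char → Nat → Nat → Option (List Char) → Option (List Char)
  | [], _, _, best => best
  | ch :: rest, pos, segStart, best =>
    if ch = '.' then
      pvLoopB full p rest (pos + 1) (pos + 1)
        (if segStart + p.length ≤ pos ∧
            PySem.Chars.slice full (some (segStart : Int)) (some ((segStart : Int) + (p.length : Int))) = p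
         then some (PySem.Chars.slice full (some ((segStart : Int) + (p.length : Int))) (some (pos : Int)))
         else best)
    else pvLoopB full p rest (pos + 1) segStart best

def extract_number_from_id_py_alt (element_id : String) (prefix_ : String) : String :=
  if element_id = "" then ""
  else
    match pvLoopB element_id.toList prefix_.toList (element_id.toList ++ ['.']) 0 0 none with
    | some r => String.ofList r
    | none => element_id

-- ===== PRECONDITION & SPEC =====
def Spec_extract_number_from_id_py (element_id : String) (prefix_ : String) (out : String) : Prop := out = extract_number_from_id_py_alt element_id prefix_
instance (element_id : String) (prefix_ : String) (out : String) : Decidable (Spec_extract_number_from_id_py element_id prefix_ out) := by unfold Spec_extract_number_from_id_py; infer_instance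

-- ===== CLAIM (what is proved, stated in full; the proofs are below) =====
def Claim_equal_extract_number_from_id_py : Prop := ∀ (element_id : String) (prefix_ : String), Dom_extract_number_from_id_py element_id prefix_ → Spec_extract_number_from_id_py element_id prefix_ (extract_number_from_id_py element_id prefix_)

-- ===== LEMMAS AND PROOFS =====

-- fuel-free reading of PySem.Chars.splitOn with separator "."
def pvSplit (pre : List Char) : List Char → List (List Char)
  | [] => [pre]
  | c :: rest => if c = '.' then pre :: pvSplit [] rest else pvSplit (pre ++ [c]) rest

lemma pvSplit_nil (pre : List Char) : pvSplit pre [] = [pre] := rfl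

lemma pvSplit_cons (pre : List Char) (c : Char) (rest : List Char) :
    pvSplit pre (c :: rest) =
      if c = '.' then pre :: pvSplit [] rest else pvSplit (pre ++ [c]) rest := rfl

lemma pvSplitOnGo_eq : ∀ (fuel : Nat) (l cur : List Char) (acc : List (List Char)),
    l.length ≤ fuel →
    PySem.Chars.splitOn.go ['.'] fuel l cur acc = acc.reverse ++ pvSplit cur.reverse l := by
  intro fuel
  induction fuel with
  | zero =>
    intro l cur acc hl
    have : l = [] := List.length_eq_zero_iff.mp (by omega)
    subst this
    rw [PySem.Chars.splitOn.go.eq_def]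
    simp [pvSplit_nil]
  | succ f ih =>
    intro l cur acc hl
    cases l with
    | nil =>
      rw [PySem.Chars.splitOn.go.eq_def]
      simp [pvSplit_nil]
    | cons c rest =>
      rw [PySem.Chars.splitOn.go.eq_def]
      by_cases hc : c = '.'
      · subst hc
        have hp : ['.'].isPrefixOf ('.' :: rest) = true := by simp [List.isPrefixOf]
        simp only [hp, if_true]
        rw [ih _ _ _ (by simpa using Nat.le_of_succ_le_succ hl)]
        simp [pvSplit_cons]
      · have hp : ¬ ['.'].isPrefixOf (c :: rest) = true := by
          simp [List.isPrefixOf]; exact fun hh => hc hh.symm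
        simp only [hp]
        rw [ih rest (c :: cur) acc (by simp at hl; omega)]
        simp [pvSplit_cons, hc]

lemma pvSplitOn_eq (s : List Char) : PySem.Chars.splitOn s ['.'] = pvSplit [] s := by
  unfold PySem.Chars.splitOn
  rw [pvSplitOnGo_eq (s.length + 1) s [] [] (by omega)]
  simp

-- the segments a '.'-terminated tail closes ('.' closes a segment, a trailing partial one is dropped)
def pvSegs (cur : List Char) : List Char → List (List Char)
  | [] => []
  | c :: rest => if c = '.' then cur :: pvSegs [] rest else pvSegs (cur ++ [c]) rest

lemma pvSegs_append_dot : ∀ (v cur : List Char), pvSegs cur (v ++ ['.']) = pvSplit cur v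
  | [], cur => by simp [pvSegs, pvSplit_nil]
  | c :: v, cur => by
    by_cases hc : c = '.'
    · subst hc
      simp only [List.cons_append, pvSegs, pvSplit_cons]
      simp [pvSegs_append_dot v []]
    · simp only [List.cons_append, pvSegs, pvSplit_cons, if_neg hc]
      rw [pvSegs_append_dot v (cur ++ [c])]

-- the "last matching segment" left fold B computes
def pvSegFold (p : List Char) (best : Option (List Char)) (l : List (List Char)) : Option (List Char) :=
  l.foldl (fun acc part =>
    if PySem.Chars.startswith part p then
      some (PySem.Chars.slice part (some (p.length : Int)) none)
    else acc) best

lemma pvSegFold_nil (p : List Char) (best : Option (List Char)) : pvSegFold p best [] = best := rfl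

lemma pvSegFold_cons (p : List Char) (best : Option (List Char)) (c : List Char) (l : List (List Char)) :
    pvSegFold p best (c :: l) =
      pvSegFold p (if PySem.Chars.startswith c p then
        some (PySem.Chars.slice c (some (p.length : Int)) none) else best) l := rfl

-- A's first match from the right = the last match of the forward fold
lemma pvGoA_reverse (p : List Char) : ∀ l : List (List Char),
    pvGoA l.reverse p = pvSegFold p none l := by
  intro l
  induction l using List.reverseRecOn with
  | nil => rfl
  | append_singleton t x ih =>
    rw [List.reverse_append]
    simp only [List.reverse_cons, List.reverse_nil, List.nil_append, List.singleton_append]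
    unfold pvSegFold
    rw [List.foldl_append]
    simp only [List.foldl_cons, List.foldl_nil]
    unfold pvGoA
    by_cases hx : PySem.Chars.startswith x p = true
    · simp [hx, PySem.Chars.len_eq]
    · simp only [hx, if_false, Bool.false_eq_true]
      exact ih

-- the condition B tests on the raw string is exactly "segment startswith prefix"
lemma pvCond_iff (full p : List Char) (segStart idx : Nat)
    (h1 : segStart ≤ idx) (h2 : idx ≤ full.length) :
    (segStart + p.length ≤ idx ∧
      PySem.Chars.slice full (some (segStart : Int)) (some ((segStart : Int) + (p.length : Int))) = p)
    ↔ PySem.Chars.startswith ((full.drop segStart).take (idx - segStart)) p = true := by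
  have hcast : ((segStart : Int) + (p.length : Int)) = ((segStart + p.length : Nat) : Int) := by push_cast; ring
  rw [hcast, PySem.Chars.slice_eq_listSlice, PySem.List.slice_natCast,
    PySem.Chars.startswith_iff, List.prefix_iff_eq_take]
  have hslice : segStart + p.length - segStart = p.length := by omega
  rw [hslice]
  have hlen : ((full.drop segStart).take (idx - segStart)).length = idx - segStart := by
    simp; omega
  constructor
  · rintro ⟨hle, heq⟩
    rw [List.take_take]
    rw [Nat.min_eq_left (by omega)]
    exact heq.symm
  · intro heq
    have hplen : p.length ≤ idx - segStart := by
      have h' := congrArg List.length heq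
      simp only [List.length_take, hlen] at h'
      omega
    constructor
    · omega
    · conv_rhs => rw [heq]
      rw [List.take_take, Nat.min_eq_left hplen]

-- B's suffix slice of the raw string is the segment's drop
lemma pvSuffix_eq (full p : List Char) (segStart idx : Nat) :
    PySem.Chars.slice full (some ((segStart : Int) + (p.length : Int))) (some (idx : Int))
      = PySem.Chars.slice ((full.drop segStart).take (idx - segStart)) (some (p.length : Int)) none := by
  have hcast : ((segStart : Int) + (p.length : Int)) = ((segStart + p.length : Nat) : Int) := by push_cast; ring
  rw [hcast, PySem.Chars.slice_eq_listSlice, PySem.List.slice_natCast,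
    PySem.Chars.slice_eq_listSlice, PySem.List.slice_from_natCast,
    List.drop_take, List.drop_drop]
  congr 1
  omega

-- main invariant: the forward pass from position idx equals the fold over the remaining segments
lemma pvLoopB_eq : ∀ (u full p : List Char) (idx segStart : Nat) (best : Option (List Char)),
    segStart ≤ idx → idx + u.length = full.length + 1 → u = (full ++ ['.']).drop idx →
    pvLoopB full p u idx segStart best
      = pvSegFold p best (pvSegs ((full.drop segStart).take (idx - segStart)) u) := by
  intro u
  induction u with
  | nil =>
    intro full p idx segStart best _ _ _
    simp [pvLoopB, pvSegs, pvSegFold_nil]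
  | cons ch rest ih =>
    intro full p idx segStart best h1 h2 h3
    have hidx : idx ≤ full.length := by simp at h2; omega
    have hch : (full ++ ['.'])[idx]? = some ch := by
      have : ((full ++ ['.']).drop idx)[0]? = some ch := by rw [← h3]; rfl
      rwa [List.getElem?_drop, Nat.add_zero] at this
    have hrest : rest = (full ++ ['.']).drop (idx + 1) := by
      have h' := congrArg List.tail h3
      rw [List.tail_drop] at h'
      simpa using h'
    by_cases hc : ch = '.'
    · subst hc
      rw [pvLoopB, if_pos rfl]
      rw [ih full p (idx + 1) (idx + 1) _ (le_refl _) (by simp at h2 ⊢; omega) hrest]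
      simp only [Nat.sub_self, List.take_zero]
      rw [pvSegs, if_pos rfl, pvSegFold_cons]
      congr 1
      by_cases hcond : segStart + p.length ≤ idx ∧
          PySem.Chars.slice full (some (segStart : Int)) (some ((segStart : Int) + (p.length : Int))) = p
      · rw [if_pos hcond, if_pos ((pvCond_iff full p segStart idx h1 hidx).mp hcond)]
        rw [pvSuffix_eq full p segStart idx]
      · rw [if_neg hcond, if_neg (by
          intro hsw
          exact hcond ((pvCond_iff full p segStart idx h1 hidx).mpr hsw))]
    · rw [pvLoopB]
      rw [if_neg hc]
      have hlt : idx < full.length := by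
        by_contra hge
        have : idx = full.length := by omega
        subst this
        rw [List.getElem?_append_right (le_refl _)] at hch
        simp at hch
        exact hc hch.symm
      have hfull : full[idx]? = some ch := by
        rwa [List.getElem?_append_left hlt] at hch
      rw [ih full p (idx + 1) segStart best (by omega) (by simp at h2 ⊢; omega) hrest]
      rw [pvSegs, if_neg hc]
      congr 2
      rw [show idx + 1 - segStart = (idx - segStart) + 1 by omega, List.take_add_one]
      congr 1
      rw [List.getElem?_drop]
      rw [show segStart + (idx - segStart) = idx by omega, hfull]
      rfl

-- ===== VERDICT (by name: the statement is the Claim_ definition above) =====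
theorem extract_number_from_id_py_spec : Claim_equal_extract_number_from_id_py := by
  intro element_id prefix_ _
  unfold Spec_extract_number_from_id_py
  unfold extract_number_from_id_py extract_number_from_id_py_alt
  by_cases he : element_id = ""
  · simp [he]
  · rw [if_neg he, if_neg he]
    rw [pvLoopB_eq (element_id.toList ++ ['.']) element_id.toList prefix_.toList 0 0 none
      (le_refl _) (by simp) (by simp)]
    rw [pvSplitOn_eq]
    simp only [List.drop_zero, Nat.sub_zero, List.take_zero]
    rw [pvSegs_append_dot element_id.toList [], pvGoA_reverse]
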